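-- pv_equiv track=rewrite | github.com/NgQuangHuyit/PythonCodePtit | PY01011.py | list_palindromic_bf_nums
-- ===== SOURCE A (Python) =====
-- def list_palindromic_bf_nums(limit:int) -> list:
--     res = []
--     for i in range(22, limit, 2):
--         str_num = str(i)
--         if len(str_num) % 2 == 1:
--             continue
--         if all(int(digit) % 2 == 0 for digit in str_num):
--             if str_num == str_num[-1::-1]:
--                 res.append(i)
--         else:
--             continue
--     return res
-- ===== SOURCE B (Python) =====
-- def _halves(d):
--     # all-even half-prefixes of length d as (value, mirrored value), ascending
--     if d == 1:
--         return [(2, 2), (4, 4), (6, 6), (8, 8)]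
--     return [(10 * h + c, c * 10 ** (d - 1) + m)
--             for h, m in _halves(d - 1) for c in (0, 2, 4, 6, 8)]
--
--
-- def list_palindromic_bf_nums(limit: int) -> list:
--     res = []
--     d = 1
--     while 2 * 10 ** (2 * d - 1) + 2 < limit:
--         for h, m in _halves(d):
--             p = h * 10 ** d + m
--             if p < limit:
--                 res.append(p)
--         d += 1
--     return res
-- ===== Notes on version B (the rewrite author's own statement) =====
-- stated objective: faster
-- what changed: Instead of scanning every even number below limit and testing its decimal string, B directly generates the all-even palindromes arithmetically from their half-prefixes (value plus mirrored value), level by level in ascending order, so the work is proportional to the output size rather than to limit.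
import Mathlib
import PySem

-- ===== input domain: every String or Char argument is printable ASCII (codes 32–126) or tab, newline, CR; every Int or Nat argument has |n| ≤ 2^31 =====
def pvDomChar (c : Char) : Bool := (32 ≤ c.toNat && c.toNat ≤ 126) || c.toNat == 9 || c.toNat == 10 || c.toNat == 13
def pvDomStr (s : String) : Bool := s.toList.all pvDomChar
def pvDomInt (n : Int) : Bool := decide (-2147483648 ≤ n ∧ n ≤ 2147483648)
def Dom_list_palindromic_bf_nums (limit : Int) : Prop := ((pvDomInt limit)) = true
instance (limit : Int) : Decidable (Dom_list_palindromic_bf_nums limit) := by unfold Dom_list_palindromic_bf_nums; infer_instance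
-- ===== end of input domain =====

-- B replaces A's scan of every even number below `limit` (string test per number) by direct
-- arithmetic generation of the all-even palindromes from their half-prefixes, in ascending order.

-- ===== PORT A =====
-- literal transliteration of A: for i in range(22, limit, 2), build str(i), skip odd lengths,
-- keep i when all digits are even and the string is its own reverse (s[-1::-1]).
-- int(digit) is ported as (ofStr? …).getD 0: its argument is always a single decimal digit of
-- str(i), so the ValueError branch of int() is unreachable.
def list_palindromic_bf_nums (limit : Int) : List Int :=
  (PySem.List.pyRange 22 limit 2).foldl (fun res i =>
    let str_num := PySem.Int.toStr i
    if PySem.Int.mod (PySem.Str.len str_num) 2 == 1 then res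
    else if str_num.toList.all (fun digit =>
          PySem.Int.mod ((PySem.Int.ofStr? (String.ofList [digit])).getD 0) 2 == 0) then
      if PySem.Str.slice? str_num (some (-1)) none (-1) == some str_num then res ++ [i] else res
    else res) []

-- ===== PORT B =====
-- transliteration of Source B's _halves: all-even half-prefixes of length d as
-- (value, mirrored value) pairs, in ascending order of the value.
def pvHalves : Nat → List (Int × Int)
  | 0 => []
  | 1 => [(2, 2), (4, 4), (6, 6), (8, 8)]
  | (d+2) => (pvHalves (d+1)).flatMap (fun hm =>
      ([0, 2, 4, 6, 8] : List Int).map (fun c => (10 * hm.1 + c, c * 10 ^ (d+1) + hm.2)))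

-- transliteration of Source B's while-loop, one recursive call per level d (the loop condition
-- 2*10^(2d-1)+2 < limit is Source B's; termination: 10^(2d-1) grows past limit).
def pvLoopB (limit : Int) (d : Nat) : List Int :=
  if 2 * 10 ^ (2 * d - 1) + 2 < limit then
    ((pvHalves d).foldl (fun res hm =>
        let p := hm.1 * 10 ^ d + hm.2
        if p < limit then res ++ [p] else res) []) ++ pvLoopB limit (d + 1)
  else []
termination_by (limit.toNat + 1) - 10 ^ (2 * d - 1)
decreasing_by
  rename_i h
  have hp : ((10 ^ (2*d - 1) : ℕ) : ℤ) < limit := by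
    push_cast
    nlinarith [pow_nonneg (by norm_num : (0:ℤ) ≤ 10) (2*d - 1)]
  have hN : 10 ^ (2*d - 1) < limit.toNat := Int.lt_toNat.mpr hp
  have hm2 : 10 ^ (2*d - 1) < 10 ^ (2*(d+1) - 1) := Nat.pow_lt_pow_right (by norm_num) (by omega)
  generalize 10 ^ (2*d - 1) = a at *
  generalize 10 ^ (2*(d+1) - 1) = b at *
  omega

def list_palindromic_bf_nums_alt (limit : Int) : List Int := pvLoopB limit 1

-- ===== PRECONDITION & SPEC =====
def Spec_list_palindromic_bf_nums (limit : Int) (out : List Int) : Prop := out = list_palindromic_bf_nums_alt limit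
instance (limit : Int) (out : List Int) : Decidable (Spec_list_palindromic_bf_nums limit out) := by unfold Spec_list_palindromic_bf_nums; infer_instance

-- ===== CLAIM (what is proved, stated in full; the proofs are below) =====
def Claim_equal_list_palindromic_bf_nums : Prop := ∀ (limit : Int), Dom_list_palindromic_bf_nums limit → Spec_list_palindromic_bf_nums limit (list_palindromic_bf_nums limit)

-- ===== LEMMAS AND PROOFS =====

-- digit characters and their values
def pvTen : List Char := ['0','1','2','3','4','5','6','7','8','9']
def pvEv  : List Char := ['0','2','4','6','8']
def pvNz  : List Char := ['2','4','6','8']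
def pvDigit (c : Char) : ℕ := c.toNat - 48
def pvVal (s : List Char) : ℕ := s.foldl (fun a c => 10 * a + pvDigit c) 0

-- decimal representation (chars of str(n) for n : ℕ)
def pvRep (n : ℕ) : List Char :=
  if n < 10 then [Nat.digitChar n] else pvRep (n / 10) ++ [Nat.digitChar (n % 10)]
decreasing_by exact Nat.div_lt_self (by omega) (by norm_num)

-- char-level view of pvHalves
def pvHalvesC : Nat → List (List Char)
  | 0 => []
  | 1 => [['2'],['4'],['6'],['8']]
  | (d+2) => (pvHalvesC (d+1)).flatMap (fun h => pvEv.map (fun c => h ++ [c]))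

-- the palindrome an all-even half s of length d encodes
def pvPalOf (s : List Char) : Int := (pvVal s : Int) * 10 ^ s.length + (pvVal s.reverse : Int)

-- A's per-number test, as one boolean
def pvTest (i : Int) : Bool :=
  let str_num := PySem.Int.toStr i
  !(PySem.Int.mod (PySem.Str.len str_num) 2 == 1) &&
  str_num.toList.all (fun digit =>
    PySem.Int.mod ((PySem.Int.ofStr? (String.ofList [digit])).getD 0) 2 == 0) &&
  (PySem.Str.slice? str_num (some (-1)) none (-1) == some str_num)

-- ---- pvVal basics ----
lemma pvVal_go (s : List Char) (a : ℕ) :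
    s.foldl (fun a c => 10 * a + pvDigit c) a = a * 10 ^ s.length + pvVal s := by 
  induction s generalizing a with
  | nil => simp [pvVal]
  | cons c t ih =>
    have h0 : pvVal (c :: t) = t.foldl (fun a c => 10 * a + pvDigit c) (10 * 0 + pvDigit c) := rfl
    simp only [List.foldl_cons, List.length_cons]
    rw [ih, h0, ih]
    ring

lemma pvVal_cons (c : Char) (t : List Char) :
    pvVal (c :: t) = pvDigit c * 10 ^ t.length + pvVal t := by 
  have h0 : pvVal (c :: t) = t.foldl (fun a c => 10 * a + pvDigit c) (10 * 0 + pvDigit c) := rfl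
  rw [h0, pvVal_go]; ring

lemma pvVal_append (x y : List Char) :
    pvVal (x ++ y) = pvVal x * 10 ^ y.length + pvVal y := by 
  have h0 : pvVal (x ++ y) = y.foldl (fun a c => 10 * a + pvDigit c) (pvVal x) := by
    simp [pvVal, List.foldl_append]
  rw [h0, pvVal_go]

lemma pvVal_concat (t : List Char) (c : Char) :
    pvVal (t ++ [c]) = 10 * pvVal t + pvDigit c := by 
  rw [pvVal_append]
  have : pvVal [c] = pvDigit c := by simp [pvVal]
  simp [this]; ring

lemma pvVal_lt (s : List Char) (h : ∀ c ∈ s, c ∈ pvTen) : pvVal s < 10 ^ s.length := by 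
  induction s with
  | nil => simp [pvVal]
  | cons c t ih =>
    have hc : pvDigit c ≤ 9 := by
      have := h c (by simp)
      fin_cases this <;> decide
    have ht : pvVal t < 10 ^ t.length := ih (fun x hx => h x (by simp [hx]))
    have hX : 0 < 10 ^ t.length := Nat.pow_pos (by norm_num)
    rw [pvVal_cons, List.length_cons, pow_succ]
    nlinarith

-- ---- digitChar facts ----
lemma pvDigitChar_mem (k : ℕ) (h : k < 10) : Nat.digitChar k ∈ pvTen := by 
  interval_cases k <;> decide
lemma pvDigit_digitChar (k : ℕ) (h : k < 10) : pvDigit (Nat.digitChar k) = k := by 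
  interval_cases k <;> decide
lemma pvDigitChar_pvDigit (c : Char) (h : c ∈ pvTen) : Nat.digitChar (pvDigit c) = c := by 
  fin_cases h <;> decide

-- ---- pvRep facts ----
lemma pvRep_eq (n : ℕ) :
    pvRep n = if n < 10 then [Nat.digitChar n]
              else pvRep (n / 10) ++ [Nat.digitChar (n % 10)] := by 
  rw [pvRep]

lemma pvRep_ne_nil (n : ℕ) : pvRep n ≠ [] := by 
  rw [pvRep_eq]; split <;> simp

lemma pvRep_mem_ten (n : ℕ) : ∀ c ∈ pvRep n, c ∈ pvTen := by 
  induction n using Nat.strong_induction_on with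
  | _ n ih =>
    rw [pvRep_eq]
    split
    · intro c hc
      simp only [List.mem_singleton] at hc
      subst hc
      exact pvDigitChar_mem _ (by omega)
    · intro c hc
      rcases List.mem_append.mp hc with h1 | h1
      · exact ih (n / 10) (Nat.div_lt_self (by omega) (by norm_num)) c h1
      · simp only [List.mem_singleton] at h1
        subst h1
        exact pvDigitChar_mem _ (Nat.mod_lt _ (by norm_num))

lemma pvRep_head (n : ℕ) (h : n ≠ 0) : ∀ c, (pvRep n).head? = some c → c ≠ '0' := by 
  induction n using Nat.strong_induction_on with
  | _ n ih =>
    rw [pvRep_eq]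
    split
    · intro c hc
      simp only [List.head?_cons, Option.some.injEq] at hc
      subst hc
      rename_i h10
      interval_cases n <;> simp_all <;> decide
    · intro c hc
      rename_i h10
      have hne := pvRep_ne_nil (n / 10)
      rw [List.head?_append_of_ne_nil _ hne] at hc
      exact ih (n / 10) (Nat.div_lt_self (by omega) (by norm_num)) (by omega) c hc

lemma pvVal_pvRep (n : ℕ) : pvVal (pvRep n) = n := by 
  induction n using Nat.strong_induction_on with
  | _ n ih =>
    rw [pvRep_eq]
    split
    · rename_i h10
      have : pvVal [Nat.digitChar n] = pvDigit (Nat.digitChar n) := by simp [pvVal]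
      rw [this, pvDigit_digitChar _ h10]
    · rename_i h10
      rw [pvVal_concat, ih (n / 10) (Nat.div_lt_self (by omega) (by norm_num)),
        pvDigit_digitChar _ (Nat.mod_lt _ (by norm_num))]
      omega

lemma pvVal_pos (s : List Char) (hne : s ≠ []) (hten : ∀ c ∈ s, c ∈ pvTen)
    (hh : ∀ c, s.head? = some c → c ≠ '0') : 1 ≤ pvVal s := by 
  obtain ⟨c0, t, rfl⟩ := List.exists_cons_of_ne_nil hne
  have hc0 : c0 ∈ pvTen := hten c0 (by simp)
  have hz : c0 ≠ '0' := hh c0 (by simp)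
  have hd : 1 ≤ pvDigit c0 := by fin_cases hc0 <;> simp_all <;> decide
  have hX : 0 < 10 ^ t.length := Nat.pow_pos (by norm_num)
  rw [pvVal_cons]
  nlinarith

lemma pvRep_pvVal (s : List Char) (hne : s ≠ []) (hten : ∀ c ∈ s, c ∈ pvTen)
    (hh : ∀ c, s.head? = some c → c ≠ '0') : pvRep (pvVal s) = s := by 
  induction s using List.reverseRecOn with
  | nil => exact absurd rfl hne
  | append_singleton t c ih =>
    have hcten : c ∈ pvTen := hten c (by simp)
    have hcd : pvDigit c ≤ 9 := by fin_cases hcten <;> decide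
    rcases eq_or_ne t [] with rfl | htne
    · have hv : pvVal ([] ++ [c]) = pvDigit c := by simp [pvVal]
      rw [hv, pvRep_eq, if_pos (by omega)]
      simp [pvDigitChar_pvDigit c hcten]
    · have hth : ∀ x, t.head? = some x → x ≠ '0' := by
        intro x hx
        exact hh x (by rw [List.head?_append_of_ne_nil _ htne]; exact hx)
      have htten : ∀ x ∈ t, x ∈ pvTen := fun x hx => hten x (by simp [hx])
      have htpos : 1 ≤ pvVal t := pvVal_pos t htne htten hth
      have hv : pvVal (t ++ [c]) = 10 * pvVal t + pvDigit c := pvVal_concat t c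
      rw [hv, pvRep_eq, if_neg (by omega)]
      have hdiv : (10 * pvVal t + pvDigit c) / 10 = pvVal t := by omega
      have hmod : (10 * pvVal t + pvDigit c) % 10 = pvDigit c := by omega
      rw [hdiv, hmod, ih htne htten hth, pvDigitChar_pvDigit c hcten]

-- ---- str(n) = pvRep ----
lemma pvToDigitsCore_eq (f : ℕ) : ∀ (n : ℕ) (acc : List Char), 0 < f → n < 10 ^ f →
    Nat.toDigitsCore 10 f n acc = pvRep n ++ acc := by 
  induction f with
  | zero => intro n acc h; omega
  | succ f ih =>
    intro n acc _ hn
    rw [show Nat.toDigitsCore 10 (f+1) n acc =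
        (if n / 10 = 0 then (n % 10).digitChar :: acc
         else Nat.toDigitsCore 10 f (n / 10) ((n % 10).digitChar :: acc)) from by
      simp [Nat.toDigitsCore]]
    split
    · rename_i h0
      have h10 : n < 10 := by omega
      rw [pvRep_eq, if_pos h10, Nat.mod_eq_of_lt h10]
      simp
    · rename_i h0
      have hf : 0 < f := by
        rcases Nat.eq_zero_or_pos f with rfl | hf
        · rw [pow_one] at hn; omega
        · exact hf
      have hdiv : n / 10 < 10 ^ f := by
        rw [Nat.div_lt_iff_lt_mul (by norm_num)]
        calc n < 10 ^ (f + 1) := hn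
        _ = 10 ^ f * 10 := by ring
      rw [ih (n / 10) _ hf hdiv]
      conv_rhs => rw [pvRep_eq, if_neg (show ¬ n < 10 by omega)]
      simp

lemma pvToChars_eq (n : Int) (h : 0 ≤ n) : PySem.Int.toChars n = pvRep n.toNat := by 
  unfold PySem.Int.toChars
  rw [if_neg (by omega)]
  show Nat.toDigits 10 n.toNat = pvRep n.toNat
  unfold Nat.toDigits
  rw [pvToDigitsCore_eq (n.toNat + 1) n.toNat [] (Nat.succ_pos _)
    (lt_of_lt_of_le (Nat.lt_pow_self (by norm_num))
      (Nat.pow_le_pow_right (by norm_num) (Nat.le_succ _)))]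
  simp

-- ---- s[-1::-1] is reverse ----
lemma pvSliceRev (s : String) :
    PySem.Str.slice? s (some (-1)) none (-1) = some (String.ofList s.toList.reverse) := by 
  unfold PySem.Str.slice?
  rw [show PySem.Chars.slice? s.toList (some (-1)) none (-1) = PySem.List.slice? s.toList none none (-1) from by
    unfold PySem.Chars.slice? PySem.List.slice?
    rw [show PySem.List.sliceIndices s.toList.length (some (-1)) none (-1) =
        PySem.List.sliceIndices s.toList.length none none (-1) from by
      unfold PySem.List.sliceIndices; norm_num; omega]]
  rw [PySem.List.slice?_none_none_neg_one]
  rfl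

-- ---- pvHalves vs pvHalvesC ----
lemma pvHalvesC_length : ∀ d s, s ∈ pvHalvesC d → s.length = d := by 
  intro d
  induction d using pvHalvesC.induct with
  | case1 => simp [pvHalvesC]
  | case2 => intro s hs; fin_cases hs <;> rfl
  | case3 e ih =>
    intro s hs
    simp only [pvHalvesC, List.mem_flatMap, List.mem_map] at hs
    obtain ⟨h, hh, c, _, rfl⟩ := hs
    simp [ih h hh]

lemma pvHalves_eq_map : ∀ d, pvHalves d =
    (pvHalvesC d).map (fun s => ((pvVal s : Int), (pvVal s.reverse : Int))) := by 
  intro d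
  induction d using pvHalvesC.induct with
  | case1 => rfl
  | case2 => decide
  | case3 e ih =>
    show pvHalves (e+2) = _
    rw [show pvHalves (e+2) = (pvHalves (e+1)).flatMap (fun hm =>
        ([0, 2, 4, 6, 8] : List Int).map (fun c => (10 * hm.1 + c, c * 10 ^ (e+1) + hm.2))) from rfl]
    rw [ih]
    show _ = (pvHalvesC (e+2)).map _
    rw [show pvHalvesC (e+2) = (pvHalvesC (e+1)).flatMap (fun h => pvEv.map (fun c => h ++ [c])) from rfl]
    rw [List.flatMap_map, List.map_flatMap]
    apply List.flatMap_congr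
    intro h hh
    have hlen : h.length = e + 1 := pvHalvesC_length _ _ hh
    rw [show ([0, 2, 4, 6, 8] : List Int) = pvEv.map (fun c => (pvDigit c : Int)) from by decide]
    rw [List.map_map, List.map_map]
    apply List.map_congr_left
    intro c _
    simp only [Function.comp]
    have h1 : pvVal (h ++ [c]) = 10 * pvVal h + pvDigit c := pvVal_concat h c
    have h2 : (h ++ [c]).reverse = c :: h.reverse := by simp
    have h3 : pvVal (c :: h.reverse) = pvDigit c * 10 ^ h.reverse.length + pvVal h.reverse :=
      pvVal_cons c h.reverse
    rw [h1, h2, h3, List.length_reverse, hlen]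
    constructor

lemma mem_pvHalvesC : ∀ d s, s ∈ pvHalvesC d ↔
    (s.length = d ∧ ∃ c0 t, s = c0 :: t ∧ c0 ∈ pvNz ∧ ∀ c ∈ t, c ∈ pvEv) := by 
  intro d
  induction d using pvHalvesC.induct with
  | case1 =>
    intro s
    simp only [pvHalvesC, List.not_mem_nil, false_iff]
    rintro ⟨hl, c0, t, rfl, -, -⟩
    simp at hl
  | case2 =>
    intro s
    constructor
    · intro hs
      fin_cases hs <;> exact ⟨rfl, _, [], rfl, by decide, by simp⟩
    · rintro ⟨hl, c0, t, rfl, hc0, -⟩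
      have : t = [] := by simpa using hl
      subst this
      fin_cases hc0 <;> simp [pvHalvesC]
  | case3 e ih =>
    intro s
    constructor
    · intro hs
      simp only [pvHalvesC, List.mem_flatMap, List.mem_map] at hs
      obtain ⟨h, hh, c, hc, rfl⟩ := hs
      obtain ⟨hl, c0, t, rfl, hc0, ht⟩ := (ih h).mp hh
      refine ⟨by simp at hl ⊢; omega, c0, t ++ [c], rfl, hc0, ?_⟩
      intro x hx
      rcases List.mem_append.mp hx with h1 | h1
      · exact ht x h1
      · simp only [List.mem_singleton] at h1; subst h1; exact hc
    · rintro ⟨hl, c0, t, rfl, hc0, ht⟩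
      have htne : t ≠ [] := by
        intro h; subst h; simp at hl
      have hsplit : t.dropLast ++ [t.getLast htne] = t := List.dropLast_append_getLast htne
      simp only [pvHalvesC, List.mem_flatMap, List.mem_map]
      refine ⟨c0 :: t.dropLast, ?_, t.getLast htne, ht _ (List.getLast_mem htne), ?_⟩
      · apply (ih _).mpr
        refine ⟨?_, c0, t.dropLast, rfl, hc0, fun c hc => ht c (List.dropLast_sublist t |>.mem hc)⟩
        have : t.length = e + 1 := by simpa using hl
        simp [List.length_dropLast, this]
      · simp only [List.cons_append, hsplit]

lemma pvHalvesC_pairwise : ∀ d, (pvHalvesC d).Pairwise (fun a b => pvVal a < pvVal b) := by 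
  intro d
  induction d using pvHalvesC.induct with
  | case1 => simp [pvHalvesC]
  | case2 => decide
  | case3 e ih =>
    show ((pvHalvesC (e+1)).flatMap (fun h => pvEv.map (fun c => h ++ [c]))).Pairwise _
    rw [List.pairwise_flatMap]
    constructor
    · intro h _
      rw [List.pairwise_map]
      have base : pvEv.Pairwise (fun c c' => pvDigit c < pvDigit c') := by decide
      apply base.imp
      intro c c' hcc
      rw [pvVal_concat, pvVal_concat]
      omega
    · apply ih.imp
      intro a b hab x hx y hy
      simp only [List.mem_map] at hx hy
      obtain ⟨c, hc, rfl⟩ := hx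
      obtain ⟨c', hc', rfl⟩ := hy
      have h1 : pvDigit c ≤ 8 := by fin_cases hc <;> decide
      rw [pvVal_concat, pvVal_concat]
      omega

lemma pvHalvesC_mem_ten (d : ℕ) (s : List Char) (h : s ∈ pvHalvesC d) : ∀ c ∈ s, c ∈ pvTen := by 
  obtain ⟨-, c0, t, rfl, hc0, ht⟩ := (mem_pvHalvesC d s).mp h
  intro c hc
  rcases List.mem_cons.mp hc with rfl | h1
  · fin_cases hc0 <;> decide
  · have := ht c h1
    fin_cases this <;> decide

-- ---- bounds on the encoded palindrome ----
lemma pvPalOf_lower (d : ℕ) (s : List Char) (h : s ∈ pvHalvesC d) :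
    2 * 10 ^ (2*d - 1) + 2 ≤ pvPalOf s := by 
  obtain ⟨hl, c0, t, rfl, hc0, ht⟩ := (mem_pvHalvesC d s).mp h
  have hd2 : pvDigit c0 ≥ 2 := by fin_cases hc0 <;> decide
  have hlen : t.length = d - 1 := by simp at hl; omega
  have hd1 : 1 ≤ d := by simp at hl; omega
  have hv : pvVal (c0 :: t) ≥ 2 * 10 ^ (d - 1) := by
    rw [pvVal_cons, hlen]; nlinarith [Nat.pow_pos (n := d-1) (show 0 < 10 by norm_num)]
  have hrev : (c0 :: t).reverse = t.reverse ++ [c0] := by simp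
  have hr : pvVal ((c0 :: t).reverse) ≥ 2 := by
    rw [hrev, pvVal_concat]; omega
  have hnat : 2 * 10 ^ (2*d - 1) + 2 ≤ pvVal (c0 :: t) * 10 ^ d + pvVal ((c0 :: t).reverse) := by
    have he : 2*d - 1 = (d - 1) + d := by omega
    rw [he, pow_add]
    nlinarith [Nat.pow_pos (n := d) (show 0 < 10 by norm_num)]
  unfold pvPalOf
  rw [hl]
  exact_mod_cast hnat


lemma pvPalOf_upper (d : ℕ) (s : List Char) (h : s ∈ pvHalvesC d) :
    pvPalOf s < 10 ^ (2*d) := by 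
  have hten := pvHalvesC_mem_ten d s h
  have hl := pvHalvesC_length d s h
  have hv : pvVal s < 10 ^ d := by rw [← hl]; exact pvVal_lt s hten
  have hr : pvVal s.reverse < 10 ^ d := by
    rw [← hl, ← List.length_reverse]
    exact pvVal_lt s.reverse (fun c hc => hten c (List.mem_reverse.mp hc))
  have hnat : pvVal s * 10 ^ d + pvVal s.reverse < 10 ^ (2*d) := by
    have he : 2*d = d + d := by omega
    rw [he, pow_add]
    nlinarith
  unfold pvPalOf
  rw [hl]
  exact_mod_cast hnat


lemma pvPalOf_even (d : ℕ) (s : List Char) (h : s ∈ pvHalvesC d) : 2 ∣ pvPalOf s := by 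
  obtain ⟨hl, c0, t, rfl, hc0, ht⟩ := (mem_pvHalvesC d s).mp h
  have hd1 : d ≠ 0 := by simp at hl; omega
  have h10 : (2 : ℕ) ∣ 10 ^ d := dvd_pow (by norm_num) hd1
  have hdc : (2 : ℕ) ∣ pvDigit c0 := by fin_cases hc0 <;> decide
  have hrev : (c0 :: t).reverse = t.reverse ++ [c0] := by simp
  have hr : (2 : ℕ) ∣ pvVal ((c0 :: t).reverse) := by
    rw [hrev, pvVal_concat]
    exact dvd_add (Dvd.dvd.mul_right (by norm_num) _) hdc
  have hnat : (2 : ℕ) ∣ pvVal (c0 :: t) * 10 ^ d + pvVal ((c0 :: t).reverse) :=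
    dvd_add (Dvd.dvd.mul_left h10 _) hr
  unfold pvPalOf
  rw [hl]
  exact_mod_cast Int.natCast_dvd_natCast.mpr hnat


lemma pvPalOf_mono (d : ℕ) (a b : List Char) (ha : a ∈ pvHalvesC d) (hb : b ∈ pvHalvesC d)
    (h : pvVal a < pvVal b) : pvPalOf a < pvPalOf b := by 
  have hla := pvHalvesC_length d a ha
  have hlb := pvHalvesC_length d b hb
  have hr : pvVal a.reverse < 10 ^ d := by
    rw [← hla, ← List.length_reverse]
    exact pvVal_lt a.reverse (fun c hc => pvHalvesC_mem_ten d a ha c (List.mem_reverse.mp hc))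
  have hnat : pvVal a * 10 ^ d + pvVal a.reverse < pvVal b * 10 ^ d + pvVal b.reverse := by
    nlinarith
  unfold pvPalOf
  rw [hla, hlb]
  exact_mod_cast hnat


-- ---- un-folding the two loops into filters ----
lemma pvFoldIf (p : Int → Bool) : ∀ (l : List Int) (acc : List Int),
    l.foldl (fun res i => if p i then res ++ [i] else res) acc = acc ++ l.filter p := by 
  intro l
  induction l with
  | nil => simp
  | cons i t ih =>
    intro acc
    simp only [List.foldl_cons, List.filter_cons]
    cases h : p i <;> simp [ih]


lemma pvA_filter (limit : Int) :
    list_palindromic_bf_nums limit = (PySem.List.pyRange 22 limit 2).filter pvTest := by 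
  unfold list_palindromic_bf_nums
  have hbody : (fun (res : List Int) (i : Int) =>
      let str_num := PySem.Int.toStr i
      if PySem.Int.mod (PySem.Str.len str_num) 2 == 1 then res
      else if str_num.toList.all (fun digit =>
            PySem.Int.mod ((PySem.Int.ofStr? (String.ofList [digit])).getD 0) 2 == 0) then
        if PySem.Str.slice? str_num (some (-1)) none (-1) == some str_num then res ++ [i] else res
      else res) = (fun res i => if pvTest i then res ++ [i] else res) := by
    funext res i
    simp only [pvTest]
    by_cases h1 : (PySem.Int.mod (PySem.Str.len (PySem.Int.toStr i)) 2 == 1) = true <;>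
      by_cases h2 : ((PySem.Int.toStr i).toList.all (fun digit =>
        PySem.Int.mod ((PySem.Int.ofStr? (String.ofList [digit])).getD 0) 2 == 0)) = true <;>
      by_cases h3 : (PySem.Str.slice? (PySem.Int.toStr i) (some (-1)) none (-1) == some (PySem.Int.toStr i)) = true <;>
      simp_all
  rw [hbody, pvFoldIf pvTest _ []]
  simp


lemma pvB_inner (limit : Int) (d : ℕ) :
    (pvHalves d).foldl (fun res hm =>
        let p := hm.1 * 10 ^ d + hm.2
        if p < limit then res ++ [p] else res) [] =
    ((pvHalvesC d).map pvPalOf).filter (fun p => decide (p < limit)) := by 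
  have hgen : ∀ (l : List (Int × Int)) (acc : List Int),
      l.foldl (fun res hm =>
        let p := hm.1 * 10 ^ d + hm.2
        if p < limit then res ++ [p] else res) acc =
      acc ++ (l.map (fun hm => hm.1 * 10 ^ d + hm.2)).filter (fun p => decide (p < limit)) := by
    intro l
    induction l with
    | nil => simp
    | cons hm t ih =>
      intro acc
      simp only [List.foldl_cons, List.map_cons, List.filter_cons]
      by_cases h : hm.1 * 10 ^ d + hm.2 < limit <;> simp [h, ih]
  rw [hgen, pvHalves_eq_map d, List.map_map]
  have : ∀ s ∈ pvHalvesC d,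
      ((fun hm : Int × Int => hm.1 * 10 ^ d + hm.2) ∘ fun s => ((pvVal s : Int), (pvVal s.reverse : Int))) s
        = pvPalOf s := by
    intro s hs
    simp only [Function.comp, pvPalOf, pvHalvesC_length d s hs]
  rw [List.map_congr_left this]
  simp


-- ---- membership characterisations ----
lemma mem_pvLoopB (limit : Int) : ∀ (d : ℕ) (x : Int), x ∈ pvLoopB limit d ↔
    ∃ e s, d ≤ e ∧ 2 * 10 ^ (2*e - 1) + 2 < limit ∧ s ∈ pvHalvesC e ∧ x = pvPalOf s ∧ x < limit := by 
  intro d x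
  fun_induction pvLoopB limit d with
  | case1 d hcond ih =>
    rw [pvB_inner]
    simp only [List.mem_append, List.mem_filter, List.mem_map, decide_eq_true_eq]
    constructor
    · rintro (⟨⟨s, hs, rfl⟩, hlt⟩ | hmem)
      · exact ⟨d, s, le_refl d, hcond, hs, rfl, hlt⟩
      · obtain ⟨e, s, he, h2, h3, h4, h5⟩ := ih.mp hmem
        exact ⟨e, s, by omega, h2, h3, h4, h5⟩
    · rintro ⟨e, s, he, h2, h3, rfl, h5⟩
      rcases eq_or_lt_of_le he with rfl | hlt
      · exact Or.inl ⟨⟨s, h3, rfl⟩, h5⟩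
      · exact Or.inr (ih.mpr ⟨e, s, by omega, h2, h3, rfl, h5⟩)
  | case2 d hcond =>
    simp only [List.not_mem_nil, false_iff]
    rintro ⟨e, s, he, h2, -, -, -⟩
    apply hcond
    have hmono : (10:ℤ) ^ (2*d - 1) ≤ 10 ^ (2*e - 1) :=
      pow_le_pow_right₀ (by norm_num) (by omega)
    omega



lemma pvModCast (n : ℕ) : PySem.Int.mod (n : ℤ) 2 = ((n % 2 : ℕ) : ℤ) := by
  unfold PySem.Int.mod
  rw [Int.fmod_eq_emod, if_pos (Or.inl (by norm_num))]
  push_cast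
  simp

lemma pvEvTest (c : Char) (hc : c ∈ pvTen) :
    (PySem.Int.mod ((PySem.Int.ofStr? (String.ofList [c])).getD 0) 2 = 0) ↔ c ∈ pvEv := by
  fin_cases hc <;> decide

lemma pvNz_of_ev (c : Char) (h : c ∈ pvEv) (h0 : c ≠ '0') : c ∈ pvNz := by
  fin_cases h
  · exact absurd rfl h0
  all_goals decide

lemma pvOfListInj (l m : List Char) (h : String.ofList l = String.ofList m) : l = m := by
  have := congrArg String.toList h
  simpa using this

lemma pvNz_ne0 (c : Char) (h : c ∈ pvNz) : c ≠ '0' := by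
  fin_cases h <;> decide

lemma pvNz_sub_ev (c : Char) (h : c ∈ pvNz) : c ∈ pvEv := by
  fin_cases h <;> decide

lemma pvTest_char (x : Int) (hx : 0 ≤ x) :
    pvTest x = true ↔ ((pvRep x.toNat).length % 2 = 0 ∧ (∀ c ∈ pvRep x.toNat, c ∈ pvEv) ∧
      (pvRep x.toNat).reverse = pvRep x.toNat) := by
  have hL : (PySem.Int.toStr x).toList = pvRep x.toNat := by
    rw [PySem.Int.toList_toStr, pvToChars_eq x hx]
  have hS : PySem.Int.toStr x = String.ofList (pvRep x.toNat) := by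
    show String.ofList (PySem.Int.toChars x) = _
    rw [pvToChars_eq x hx]
  unfold pvTest
  dsimp only
  rw [pvSliceRev (PySem.Int.toStr x)]
  simp only [Bool.and_eq_true, List.all_eq_true, Bool.not_eq_true', PySem.Str.len_eq, hL,
    beq_iff_eq, Option.some.injEq, beq_eq_false_iff_ne]
  constructor
  · rintro ⟨⟨h1, h2⟩, h3⟩
    refine ⟨?_, ?_, ?_⟩
    · rw [pvModCast] at h1
      omega
    · intro c hc
      exact (pvEvTest c (pvRep_mem_ten _ c hc)).mp (h2 c hc)
    · exact pvOfListInj _ _ (h3.trans hS)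
  · rintro ⟨h1, h2, h3⟩
    refine ⟨⟨?_, ?_⟩, ?_⟩
    · rw [pvModCast]
      omega
    · intro c hc
      exact (pvEvTest c (pvRep_mem_ten _ c hc)).mpr (h2 c hc)
    · rw [h3, hS]

lemma pvTest_iff (x : Int) (hx : 22 ≤ x) :
    pvTest x = true ↔ ∃ d s, s ∈ pvHalvesC d ∧ x = pvPalOf s := by 
  have hx0 : 0 ≤ x := by omega
  rw [pvTest_char x hx0]
  have hmx : (x.toNat : ℤ) = x := Int.toNat_of_nonneg hx0
  have hm22 : 22 ≤ x.toNat := by omega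
  constructor
  · rintro ⟨hev, hall, hpal⟩
    have hLne : pvRep x.toNat ≠ [] := pvRep_ne_nil x.toNat
    have hlenpos : 0 < (pvRep x.toNat).length := List.length_pos_iff.mpr hLne
    obtain ⟨k, hk⟩ : ∃ k, (pvRep x.toNat).length = 2 * k := ⟨(pvRep x.toNat).length / 2, by omega⟩
    have hkpos : 1 ≤ k := by omega
    have hslen : ((pvRep x.toNat).take k).length = k := by
      rw [List.length_take]; omega
    have h1 : pvRep x.toNat = (pvRep x.toNat).take k ++ (pvRep x.toNat).drop k :=
      (List.take_append_drop k _).symm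
    have h2 : pvRep x.toNat =
        ((pvRep x.toNat).drop k).reverse ++ ((pvRep x.toNat).take k).reverse := by
      calc pvRep x.toNat = (pvRep x.toNat).reverse := hpal.symm
        _ = ((pvRep x.toNat).take k ++ (pvRep x.toNat).drop k).reverse := by rw [← h1]
        _ = _ := by rw [List.reverse_append]
    have hinj := List.append_inj (h1.symm.trans h2)
      (by rw [hslen, List.length_reverse, List.length_drop]; omega)
    have hLs : pvRep x.toNat = (pvRep x.toNat).take k ++ ((pvRep x.toNat).take k).reverse := by
      conv_lhs => rw [h1]
      rw [hinj.2]
    have hsne : (pvRep x.toNat).take k ≠ [] := by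
      intro h; rw [h] at hslen; simp at hslen; omega
    obtain ⟨c0, t, hst⟩ := List.exists_cons_of_ne_nil hsne
    have hc0L : c0 ∈ pvRep x.toNat := by
      rw [hLs, hst]; simp
    have hc0ev : c0 ∈ pvEv := hall c0 hc0L
    have hc0nz : c0 ≠ '0' := by
      apply pvRep_head x.toNat (by omega) c0
      rw [hLs, hst]
      simp
    have hsmem : (pvRep x.toNat).take k ∈ pvHalvesC k := by
      refine (mem_pvHalvesC k _).mpr ⟨hslen, c0, t, hst, pvNz_of_ev c0 hc0ev hc0nz, ?_⟩
      intro c hc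
      apply hall
      rw [hLs, hst]
      exact List.mem_append_left _ (List.mem_cons_of_mem _ hc)
    refine ⟨k, (pvRep x.toNat).take k, hsmem, ?_⟩
    have hvL : pvVal (pvRep x.toNat) = x.toNat := pvVal_pvRep x.toNat
    have hsplit : pvVal (pvRep x.toNat) =
        pvVal ((pvRep x.toNat).take k) * 10 ^ k + pvVal (((pvRep x.toNat).take k).reverse) := by
      conv_lhs => rw [hLs]
      rw [pvVal_append, List.length_reverse, hslen]
    unfold pvPalOf
    rw [hslen]
    conv_lhs => rw [← hmx, ← hvL, hsplit]
    push_cast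
    ring
  · rintro ⟨d, s, hsmem, hxs⟩
    obtain ⟨hlen, c0, t, hst, hc0, ht⟩ := (mem_pvHalvesC d s).mp hsmem
    have hvL : pvVal (s ++ s.reverse) = pvVal s * 10 ^ d + pvVal s.reverse := by
      rw [pvVal_append, List.length_reverse, hlen]
    have hxv : x = (pvVal (s ++ s.reverse) : ℤ) := by
      rw [hxs]; unfold pvPalOf; rw [hvL, hlen]; push_cast; ring
    have htn : x.toNat = pvVal (s ++ s.reverse) := by omega
    have hLten : ∀ c ∈ s ++ s.reverse, c ∈ pvTen := by
      intro c hc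
      rcases List.mem_append.mp hc with h | h
      · exact pvHalvesC_mem_ten d s hsmem c h
      · exact pvHalvesC_mem_ten d s hsmem c (List.mem_reverse.mp h)
    have hrep : pvRep x.toNat = s ++ s.reverse := by
      rw [htn]
      apply pvRep_pvVal
      · rw [hst]; simp
      · exact hLten
      · intro c hc
        rw [hst] at hc
        simp at hc
        rw [← hc]
        exact pvNz_ne0 c0 hc0
    rw [hrep]
    refine ⟨?_, ?_, ?_⟩
    · rw [List.length_append, List.length_reverse, hlen]; omega
    · intro c hc
      rcases List.mem_append.mp hc with h | h
      · rw [hst] at h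
        rcases List.mem_cons.mp h with rfl | h
        · exact pvNz_sub_ev c hc0
        · exact ht c h
      · rw [List.mem_reverse, hst] at h
        rcases List.mem_cons.mp h with rfl | h
        · exact pvNz_sub_ev c hc0
        · exact ht c h
    · rw [List.reverse_append, List.reverse_reverse]

lemma pvMem_iff (limit : Int) (x : Int) :
    x ∈ list_palindromic_bf_nums limit ↔ x ∈ list_palindromic_bf_nums_alt limit := by 
  rw [pvA_filter]
  unfold list_palindromic_bf_nums_alt
  rw [List.mem_filter, PySem.List.mem_pyRange_iff_of_pos (by norm_num), mem_pvLoopB]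
  constructor
  · rintro ⟨⟨h22, hlt, hdvd⟩, htest⟩
    obtain ⟨d, s, hs, rfl⟩ := (pvTest_iff x h22).mp htest
    obtain ⟨hlen, c0, t, hst, -, -⟩ := (mem_pvHalvesC d s).mp hs
    have hd1 : 1 ≤ d := by rw [← hlen, hst]; simp
    have hlow := pvPalOf_lower d s hs
    exact ⟨d, s, hd1, by omega, hs, rfl, hlt⟩
  · rintro ⟨e, s, he1, hcond, hs, rfl, hlt⟩
    have hlow := pvPalOf_lower e s hs
    have hten : (10:ℤ) ^ 1 ≤ 10 ^ (2*e - 1) := pow_le_pow_right₀ (by norm_num) (by omega)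
    have h22 : 22 ≤ pvPalOf s := by
      rw [pow_one] at hten
      omega
    have heven := pvPalOf_even e s hs
    refine ⟨⟨h22, hlt, by omega⟩, ?_⟩
    exact (pvTest_iff _ h22).mpr ⟨e, s, hs, rfl⟩


-- ---- order ----
lemma pvA_pairwise (limit : Int) : (list_palindromic_bf_nums limit).Pairwise (· < ·) := by 
  rw [pvA_filter]
  apply List.Pairwise.sublist List.filter_sublist
  rw [PySem.List.pyRange_of_pos _ _ (show (0:ℤ) < 2 by norm_num), List.pairwise_map]
  apply (List.pairwise_lt_range).imp
  intro a b hab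
  have : (a : ℤ) < b := by exact_mod_cast hab
  omega


lemma pvLoopB_pairwise (limit : Int) : ∀ d, (pvLoopB limit d).Pairwise (· < ·) := by 
  intro d
  fun_induction pvLoopB limit d with
  | case1 d hcond ih =>
    rw [pvB_inner]
    rw [List.pairwise_append]
    refine ⟨?_, ih, ?_⟩
    · apply List.Pairwise.sublist List.filter_sublist
      rw [List.pairwise_map]
      have h0 := List.Pairwise.and_mem.mp (pvHalvesC_pairwise d)
      apply h0.imp
      rintro a b ⟨ha, hb, hab⟩
      exact pvPalOf_mono d a b ha hb hab
    · intro a ha b hb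
      obtain ⟨hamap, -⟩ := List.mem_filter.mp ha
      obtain ⟨s, hsmem, rfl⟩ := List.mem_map.mp hamap
      obtain ⟨e, s', he, hcond2, hs', hbeq, -⟩ := (mem_pvLoopB limit (d+1) b).mp hb
      have h1 := pvPalOf_upper d s hsmem
      have h2 := pvPalOf_lower e s' hs'
      have h3 : (10:ℤ) ^ (2*d) ≤ 10 ^ (2*e - 1) := pow_le_pow_right₀ (by norm_num) (by omega)
      have h4 : (0:ℤ) ≤ 10 ^ (2*e - 1) := by positivity
      rw [hbeq]
      linarith
  | case2 d hcond => exact List.Pairwise.nil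


lemma pvMain (limit : Int) : list_palindromic_bf_nums limit = list_palindromic_bf_nums_alt limit := by 
  have hA := pvA_pairwise limit
  have hB : (list_palindromic_bf_nums_alt limit).Pairwise (· < ·) := pvLoopB_pairwise limit 1
  exact List.Perm.eq_of_pairwise (fun a b _ _ h1 h2 => by omega) hA hB
    (by rw [List.perm_ext_iff_of_nodup hA.nodup hB.nodup]; exact pvMem_iff limit)


-- ===== VERDICT (by name: the statement is the Claim_ definition above) =====
theorem list_palindromic_bf_nums_spec : Claim_equal_list_palindromic_bf_nums := by
  intro limit _
  unfold Spec_list_palindromic_bf_nums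
  exact pvMain limit
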